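-- pv_equiv track=rewrite | github.com/dangvandat15021997/LiteExtensionExcersite | Algorithm/algorithms-bai1.py | findContinueSubSet
-- ===== SOURCE A (Python) =====
-- def findContinueSubSet(ar):
--     if len(ar) == 1:
--         return [[ar[0]]]
--     else:
--         base = findContinueSubSet(ar[:-1])
--         operator = ar[-1:]
--         next_base = base
--         next_base.append(operator)
--         for i in base:
--             if int(i[-1]) == (int(operator[0]) - 1):
--                 new_item = i + operator
--                 next_base.append(new_item)
--         return next_base
-- ===== SOURCE B (Python) =====
-- def findContinueSubSet(ar):
--     res = []
--     by_last = {}  # last value -> subsequences ending with that value, in res order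
--     for x in ar:
--         new_items = [[x]] + [s + [x] for s in by_last.get(x - 1, [])]
--         res += new_items
--         by_last[x] = by_last.get(x, []) + new_items
--     return res
-- ===== Notes on version B (the rewrite author's own statement) =====
-- stated objective: faster
-- what changed: Replaces A's recursion on the prefix with repeated full scans of the result list by a single left-to-right pass that keeps a dict indexing existing subsequences by their last value, so each new element extends exactly the matching subsequences without scanning; intended as faster (measured ~36-40x at n<=4096, unconfirmed at the largest probe size).
-- crash fix: On the empty list A raises RecursionError (it recurses on ar[:-1] forever); B returns []. — e.g. on findContinueSubSet([]): A raises RecursionError, B returns []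
import Mathlib
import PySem

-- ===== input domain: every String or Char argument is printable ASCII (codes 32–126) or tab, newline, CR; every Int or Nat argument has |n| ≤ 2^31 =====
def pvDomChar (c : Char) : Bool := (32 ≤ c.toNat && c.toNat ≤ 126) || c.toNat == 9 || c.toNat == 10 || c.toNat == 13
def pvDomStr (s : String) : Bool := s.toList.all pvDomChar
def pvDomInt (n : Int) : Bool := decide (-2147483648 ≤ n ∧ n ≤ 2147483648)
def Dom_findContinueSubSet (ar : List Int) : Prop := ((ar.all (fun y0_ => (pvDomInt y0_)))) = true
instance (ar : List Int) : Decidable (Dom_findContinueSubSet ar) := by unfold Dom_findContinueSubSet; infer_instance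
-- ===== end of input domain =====

-- B replaces A's prefix recursion + full rescans by one pass with a dict indexed by last value (intended as faster; measured ~36-40x at n ≤ 4096, unconfirmed at larger sizes).


-- ===== PORT A =====
-- Python's 'for i in base' iterates by index over the very list being appended to
-- (next_base aliases base); fcsLoop transcribes that index loop, with fuel only for totality.
def fcsLoop (op : Int) : Nat → Nat → List (List Int) → List (List Int)
  | 0, _, nb => nb
  | fuel+1, i, nb =>
    match PySem.List.pyGet? nb (i : Int) with
    | none => nb                      -- iterator exhausted: loop ends
    | some item =>
      match PySem.List.pyGet? item (-1) with
      | none => nb                    -- int(i[-1]) would raise IndexError (never reached: items are nonempty)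
      | some last =>
        if last = op - 1 then fcsLoop op fuel (i+1) (nb ++ [item ++ [op]])
        else fcsLoop op fuel (i+1) nb

def findContinueSubSet (ar : List Int) : List (List Int) :=
  if ar.length = 1 then [[(PySem.List.pyGet? ar 0).getD 0]]
  else if _h : ar = [] then []        -- Python recurses forever on []; totality guard (outside Pre_)
  else
    let base := findContinueSubSet (PySem.List.slice ar none (some (-1)))   -- ar[:-1]
    let operator := PySem.List.slice ar (some (-1)) none                    -- ar[-1:]
    fcsLoop ((PySem.List.pyGet? operator 0).getD 0) (2 * (base.length + 1) + 1) 0 (base ++ [operator])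
termination_by ar.length
decreasing_by
  simp only [PySem.List.slice_to_neg_one, List.length_dropLast]
  have : 0 < ar.length := List.length_pos_of_ne_nil _h
  omega

-- ===== PORT B =====
def altStep (st : List (List Int) × PySem.Dict Int (List (List Int))) (x : Int) :
    List (List Int) × PySem.Dict Int (List (List Int)) :=
  let new_items := [x] :: (st.2.getD (x - 1) []).map (fun s => s ++ [x])
  (st.1 ++ new_items, st.2.insert x (st.2.getD x [] ++ new_items))

def findContinueSubSet_alt (ar : List Int) : List (List Int) :=
  (ar.foldl altStep ([], PySem.Dict.empty)).1

-- ===== PRECONDITION & SPEC =====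
-- Pre_ excludes only the empty list, on which A raises RecursionError.
def Pre_findContinueSubSet (ar : List Int) : Prop := ar ≠ []
instance (ar : List Int) : Decidable (Pre_findContinueSubSet ar) := by unfold Pre_findContinueSubSet; infer_instance
def pvWitness_findContinueSubSet : List Int := [1, 2, 3]

-- On the empty list A raises RecursionError (it recurses on ar[:-1] forever); B returns [].
def Raises_findContinueSubSet (ar : List Int) : Prop := ar = []
instance (ar : List Int) : Decidable (Raises_findContinueSubSet ar) := by unfold Raises_findContinueSubSet; infer_instance
def pvRaiseWitness_findContinueSubSet : List Int := []
def pvRaiseWitnessOut_findContinueSubSet : List (List Int) := []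

def Spec_findContinueSubSet (ar : List Int) (out : List (List Int)) : Prop := out = findContinueSubSet_alt ar
instance (ar : List Int) (out : List (List Int)) : Decidable (Spec_findContinueSubSet ar out) := by unfold Spec_findContinueSubSet; infer_instance

-- ===== CLAIM (what is proved, stated in full; the proofs are below) =====
def Claim_equal_findContinueSubSet : Prop := ∀ (ar : List Int), Dom_findContinueSubSet ar → Pre_findContinueSubSet ar → Spec_findContinueSubSet ar (findContinueSubSet ar)
def Claim_raises_findContinueSubSet : Prop := (∀ (ar : List Int), Dom_findContinueSubSet ar → Raises_findContinueSubSet ar → ¬ Pre_findContinueSubSet ar) ∧ (Dom_findContinueSubSet (pvRaiseWitness_findContinueSubSet) ∧ Raises_findContinueSubSet (pvRaiseWitness_findContinueSubSet) ∧ findContinueSubSet_alt (pvRaiseWitness_findContinueSubSet) = pvRaiseWitnessOut_findContinueSubSet)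

-- ===== LEMMAS AND PROOFS =====

-- the extensions A's loop appends: matching subsequences of l, each extended by op
def exts (op : Int) (l : List (List Int)) : List (List Int) :=
  (l.filter (fun s => s.getLast? == some (op - 1))).map (fun s => s ++ [op])

lemma exts_nil (op : Int) : exts op [] = [] := rfl

lemma exts_append (op : Int) (l₁ l₂ : List (List Int)) :
    exts op (l₁ ++ l₂) = exts op l₁ ++ exts op l₂ := by
  simp [exts]

-- phase 2: once every remaining item ends in op, the loop appends nothing
lemma loop_noext (op : Int) : ∀ (app : List (List Int)) (fuel : Nat) (done : List (List Int)),
    (∀ s ∈ app, s.getLast? = some op) →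
    fcsLoop op fuel done.length (done ++ app) = done ++ app := by
  intro app
  induction app with
  | nil =>
    intro fuel done _
    cases fuel with
    | zero => rfl
    | succ fuel =>
      simp [fcsLoop, PySem.List.pyGet?_natCast]
  | cons a as ih =>
    intro fuel done happ
    cases fuel with
    | zero => rfl
    | succ fuel =>
      have hget : PySem.List.pyGet? (done ++ a :: as) (done.length : Int) = some a :=
        PySem.List.pyGet?_append_length done as a
      have hlast : a.getLast? = some op := happ a (by simp)
      have hne : op ≠ op - 1 := by omega
      simp only [fcsLoop, hget, PySem.List.pyGet?_neg_one, hlast, if_neg hne]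
      have := ih fuel (done ++ [a]) (fun s hs => happ s (by simp [hs]))
      simpa using this

-- phase 1: processing todo (all nonempty) appends exactly exts op todo
lemma loop_main (op : Int) : ∀ (todo : List (List Int)) (fuel : Nat) (done app : List (List Int)),
    (∀ s ∈ app, s.getLast? = some op) →
    (∀ s ∈ todo, s ≠ []) →
    todo.length + 1 ≤ fuel →
    fcsLoop op fuel done.length (done ++ todo ++ app) = done ++ todo ++ app ++ exts op todo := by
  intro todo
  induction todo with
  | nil =>
    intro fuel done app happ _ _
    have := loop_noext op app fuel done happ
    simpa [exts_nil] using this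
  | cons t ts ih =>
    intro fuel done app happ hne hfuel
    cases fuel with
    | zero => omega
    | succ fuel =>
      have hget : PySem.List.pyGet? (done ++ (t :: (ts ++ app))) (done.length : Int) = some t :=
        PySem.List.pyGet?_append_length done (ts ++ app) t
      have htne : t ≠ [] := hne t (by simp)
      obtain ⟨l, hl⟩ : ∃ l, t.getLast? = some l := by
        cases h : t.getLast? with
        | none => exact absurd (List.getLast?_eq_none_iff.mp h) htne
        | some l => exact ⟨l, rfl⟩
      by_cases hmatch : l = op - 1
      · -- matching: appends t ++ [op]
        have step : fcsLoop op (fuel+1) done.length (done ++ (t :: ts) ++ app)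
            = fcsLoop op fuel (done.length + 1) (done ++ (t :: ts) ++ app ++ [t ++ [op]]) := by
          simp only [List.append_assoc, List.cons_append] at hget ⊢
          simp [fcsLoop, hget, PySem.List.pyGet?_neg_one, hl, hmatch]
        have happ' : ∀ s ∈ app ++ [t ++ [op]], s.getLast? = some op := by
          intro s hs
          rcases List.mem_append.mp hs with h | h
          · exact happ s h
          · simp_all
        have ihe := ih fuel (done ++ [t]) (app ++ [t ++ [op]]) happ'
          (fun s hs => hne s (by simp [hs])) (by simp at hfuel ⊢; omega)
        have hx : exts op (t :: ts) = (t ++ [op]) :: exts op ts := by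
          simp [exts, hl, hmatch]
        rw [step]
        have hlen : (done ++ [t]).length = done.length + 1 := by simp
        rw [← hlen]
        calc fcsLoop op fuel (done ++ [t]).length (done ++ (t :: ts) ++ app ++ [t ++ [op]])
            = fcsLoop op fuel (done ++ [t]).length ((done ++ [t]) ++ ts ++ (app ++ [t ++ [op]])) := by
              simp
          _ = (done ++ [t]) ++ ts ++ (app ++ [t ++ [op]]) ++ exts op ts := ihe
          _ = done ++ (t :: ts) ++ app ++ exts op (t :: ts) := by simp [hx]
      · -- non-matching: no append
        have step : fcsLoop op (fuel+1) done.length (done ++ (t :: ts) ++ app)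
            = fcsLoop op fuel (done.length + 1) (done ++ (t :: ts) ++ app) := by
          simp only [List.append_assoc, List.cons_append] at hget ⊢
          simp [fcsLoop, hget, PySem.List.pyGet?_neg_one, hl, hmatch]
        have ihe := ih fuel (done ++ [t]) app happ
          (fun s hs => hne s (by simp [hs])) (by simp at hfuel ⊢; omega)
        have hx : exts op (t :: ts) = exts op ts := by
          simp [exts, hl, hmatch]
        rw [step]
        have hlen : (done ++ [t]).length = done.length + 1 := by simp
        rw [← hlen]
        calc fcsLoop op fuel (done ++ [t]).length (done ++ (t :: ts) ++ app)
            = fcsLoop op fuel (done ++ [t]).length ((done ++ [t]) ++ ts ++ app) := by simp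
          _ = (done ++ [t]) ++ ts ++ app ++ exts op ts := ihe
          _ = done ++ (t :: ts) ++ app ++ exts op (t :: ts) := by simp [hx]

-- invariant of B's fold: items are nonempty, and the dict groups the result by last value
lemma alt_inv (ar : List Int) :
    (∀ s ∈ (ar.foldl altStep ([], PySem.Dict.empty)).1, s ≠ []) ∧
    (∀ v : Int, (ar.foldl altStep ([], PySem.Dict.empty)).2.getD v []
        = (ar.foldl altStep ([], PySem.Dict.empty)).1.filter (fun s => s.getLast? == some v)) := by
  induction ar using List.reverseRecOn with
  | nil => simp [PySem.Dict.getD_empty]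
  | append_singleton ar x ih =>
    obtain ⟨ihne, ihd⟩ := ih
    set st := ar.foldl altStep ([], PySem.Dict.empty) with hst
    have hfold : (ar ++ [x]).foldl altStep ([], PySem.Dict.empty) = altStep st x := by
      simp [hst]
    rw [hfold]
    have hnew_last : ∀ s ∈ [x] :: (st.2.getD (x - 1) []).map (fun s => s ++ [x]),
        s.getLast? = some x := by
      intro s hs
      rcases List.mem_cons.mp hs with h | h
      · simp [h]
      · obtain ⟨a, _, rfl⟩ := List.mem_map.mp h
        simp
    constructor
    · intro s hs
      rcases List.mem_append.mp hs with h | h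
      · exact ihne s h
      · rcases List.mem_cons.mp h with h | h
        · simp [h]
        · obtain ⟨a, _, rfl⟩ := List.mem_map.mp h
          simp
    · intro v
      have h1 : (altStep st x).1
          = st.1 ++ ([x] :: (st.2.getD (x - 1) []).map (fun s => s ++ [x])) := rfl
      have h2 : (altStep st x).2
          = st.2.insert x (st.2.getD x [] ++ ([x] :: (st.2.getD (x - 1) []).map (fun s => s ++ [x]))) := rfl
      rw [h1, h2, PySem.Dict.getD_insert, List.filter_append]
      by_cases hv : v = x
      · subst hv
        rw [if_pos rfl]
        congr 1
        · exact ihd v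
        · exact (List.filter_eq_self.mpr (fun s hs => by
            rw [hnew_last s hs]; simp)).symm
      · rw [if_neg hv, ihd v]
        have : ([x] :: (st.2.getD (x - 1) []).map (fun s => s ++ [x])).filter
            (fun s => s.getLast? == some v) = [] := by
          apply List.filter_eq_nil_iff.mpr
          intro s hs
          rw [hnew_last s hs]
          simp [Ne.symm hv]
        rw [this, List.append_nil]

-- the dict lookup at x-1 is exactly exts x of the result so far
lemma new_items_exts (ar : List Int) (x : Int) :
    ((ar.foldl altStep ([], PySem.Dict.empty)).2.getD (x - 1) []).map (fun s => s ++ [x])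
      = exts x (ar.foldl altStep ([], PySem.Dict.empty)).1 := by
  rw [(alt_inv ar).2 (x - 1)]; rfl

lemma main_eq : ∀ (ar : List Int), ar ≠ [] → findContinueSubSet ar = findContinueSubSet_alt ar := by
  intro ar
  induction ar using List.reverseRecOn with
  | nil => intro h; exact absurd rfl h
  | append_singleton ar x ih =>
    intro _
    by_cases har : ar = []
    · subst har
      simp [findContinueSubSet, findContinueSubSet_alt, altStep, PySem.Dict.getD_empty]
    · -- length ≥ 2 branch of A
      have hlen : (ar ++ [x]).length ≠ 1 := by
        have := List.length_pos_of_ne_nil har; simp; omega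
      have hslice1 : PySem.List.slice (ar ++ [x]) none (some (-1)) = ar := by
        rw [PySem.List.slice_to_neg_one]; simp
      have hslice2 : PySem.List.slice (ar ++ [x]) (some (-1)) none = [x] := by
        rw [PySem.List.slice_from_neg_one]; simp
      rw [findContinueSubSet]
      rw [if_neg hlen, dif_neg (by simp : ¬ ar ++ [x] = [])]
      simp only [hslice1, hslice2]
      have hop : (PySem.List.pyGet? [x] 0).getD 0 = x := by
        rw [PySem.List.pyGet?_zero_cons]; rfl
      rw [hop, ih har]
      set res := (ar.foldl altStep ([], PySem.Dict.empty)).1 with hres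
      have hne : ∀ s ∈ res ++ [[x]], s ≠ [] := by
        intro s hs
        rcases List.mem_append.mp hs with h | h
        · exact (alt_inv ar).1 s h
        · simp_all
      have hloop := loop_main x (res ++ [[x]]) (2 * (res.length + 1) + 1) [] [] (by simp)
        hne (by simp)
      have hB : findContinueSubSet_alt (ar ++ [x])
          = res ++ [[x]] ++ exts x res := by
        unfold findContinueSubSet_alt
        rw [List.foldl_append]
        have h1 : List.foldl altStep (ar.foldl altStep ([], PySem.Dict.empty)) [x]
            = altStep (ar.foldl altStep ([], PySem.Dict.empty)) x := rfl
        have h2 : (altStep (ar.foldl altStep ([], PySem.Dict.empty)) x).1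
            = (ar.foldl altStep ([], PySem.Dict.empty)).1
              ++ ([x] :: ((ar.foldl altStep ([], PySem.Dict.empty)).2.getD (x - 1) []).map
                    (fun s => s ++ [x])) := rfl
        rw [h1, h2, new_items_exts]
        simp only [← hres]
        simp
      rw [hB]
      have hxext : exts x (res ++ [[x]]) = exts x res := by
        rw [exts_append]
        have : exts x [[x]] = [] := by
          simp [exts, List.filter_cons]
          omega
        simp [this]
      have hlen1 : findContinueSubSet_alt ar = res := by rw [hres]; rfl
      simpa [hxext] using hloop

-- ===== VERDICT (by name: the statement is the Claim_ definition above) =====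
theorem findContinueSubSet_spec : Claim_equal_findContinueSubSet := by
  intro ar _ hpre
  show findContinueSubSet ar = findContinueSubSet_alt ar
  exact main_eq ar hpre

@[simp] theorem findContinueSubSet_raises : Claim_raises_findContinueSubSet := by
  unfold Claim_raises_findContinueSubSet
  exact ⟨fun ar _ h => by
    unfold Raises_findContinueSubSet at h
    unfold Pre_findContinueSubSet
    simp [h], by decide⟩
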